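-- pv_equiv track=rewrite | github.com/liketaehoon/algorithm-quiz | acmicpc.net/14180/bf.py | max_after_shift
-- ===== SOURCE A (Python) =====
-- def multiplied_sum(values) :
--     ret = 0
--     for index, value in enumerate(values) :
--         ret = ret + value * (index+1)
--     return ret
--
-- def multiplied_sum_diff(values, from_index, to_index) :
--     diff = 0
--     if to_index < from_index :
--         diff = sum(values[to_index:from_index]) - values[from_index] * (from_index-to_index)
--     elif to_index > from_index :
--         diff = values[from_index] * (to_index - from_index) - sum(values[from_index+1:to_index+1])
--     return diff
--
-- def max_after_shift(length, values) :
--     ori_multiplied_sum = multiplied_sum(values)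
--     diff = 0
--     for index, value in enumerate(values) :
--         if index > 0 : # left shift
--             for left_index in range(0, index):
--                 newdiff = multiplied_sum_diff(values, index, left_index)
--                 if newdiff > diff :
--                     diff = newdiff
--         elif index < (length-1) : # right shift
--             for right_index in range(index, length):
--                 newdiff = multiplied_sum_diff(values, index, right_index)
--                 if newdiff > diff :
--                     diff = newdiff
--     return ori_multiplied_sum + diff
-- ===== SOURCE B (Python) =====
-- def max_after_shift(length, values):
--     n = len(values)
--     prefix = [0]
--     for v in values:
--         prefix.append(prefix[-1] + v)
--     total = 0
--     for i in range(n):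
--         total += values[i] * (i + 1)
--     best = 0
--     for i in range(n):
--         if i > 0:
--             # move element i left to position l: O(1) via prefix sums
--             for l in range(i):
--                 d = (prefix[i] - prefix[l]) - values[i] * (i - l)
--                 if d > best:
--                     best = d
--         elif i < length - 1:
--             # move element 0 right to position t
--             for t in range(i, length):
--                 d = values[i] * (t - i) - (prefix[min(t + 1, n)] - prefix[i + 1])
--                 if d > best:
--                     best = d
--     return total + best
-- ===== Notes on version B (the rewrite author's own statement) =====
-- stated objective: faster
-- what changed: B builds a prefix-sum table once and computes each candidate move's multiplied-sum diff in O(1) arithmetic instead of A's re-summed slices, keeping the same candidate set of moves.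
import Mathlib
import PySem

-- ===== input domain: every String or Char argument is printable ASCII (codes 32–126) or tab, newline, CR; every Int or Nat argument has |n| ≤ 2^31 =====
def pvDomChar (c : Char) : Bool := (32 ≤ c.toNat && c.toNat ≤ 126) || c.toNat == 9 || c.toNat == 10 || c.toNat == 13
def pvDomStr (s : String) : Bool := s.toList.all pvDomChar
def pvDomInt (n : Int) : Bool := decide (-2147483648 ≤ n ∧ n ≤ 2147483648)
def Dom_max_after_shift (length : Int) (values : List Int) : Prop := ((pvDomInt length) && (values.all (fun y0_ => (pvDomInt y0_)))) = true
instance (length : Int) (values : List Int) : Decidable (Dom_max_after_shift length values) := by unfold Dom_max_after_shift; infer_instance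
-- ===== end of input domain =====

-- B replaces A's per-move slice-sum (recomputed O(n) each move) by a prefix-sum table built once,
-- so each candidate move's diff is O(1) over the same candidate set.


-- ===== PORT A =====
def pvMultipliedSum (values : List Int) : Int :=
  (PySem.List.enumerate values 0).foldl (fun ret iv => ret + iv.2 * (iv.1 + 1)) 0

-- values[from_index] is always in range at A's call sites; ported as pyGetD (default unreachable)
def pvMultipliedSumDiff (values : List Int) (from_index to_index : Int) : Int :=
  if to_index < from_index then
    (PySem.List.slice values (some to_index) (some from_index)).sum
      - PySem.List.pyGetD values from_index 0 * (from_index - to_index)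
  else if to_index > from_index then
    PySem.List.pyGetD values from_index 0 * (to_index - from_index)
      - (PySem.List.slice values (some (from_index + 1)) (some (to_index + 1))).sum
  else 0

def max_after_shift (length : Int) (values : List Int) : Int :=
  let ori := pvMultipliedSum values
  let diff := (PySem.List.enumerate values 0).foldl (fun diff iv =>
    if iv.1 > 0 then
      (PySem.List.pyRange 0 iv.1 1).foldl (fun d l =>
        let newdiff := pvMultipliedSumDiff values iv.1 l
        if newdiff > d then newdiff else d) diff
    else if iv.1 < length - 1 then
      (PySem.List.pyRange iv.1 length 1).foldl (fun d t =>
        let newdiff := pvMultipliedSumDiff values iv.1 t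
        if newdiff > d then newdiff else d) diff
    else diff) 0
  ori + diff

-- ===== PORT B =====
def pvPrefix (values : List Int) : List Int :=
  values.foldl (fun p v => p ++ [PySem.List.pyGetD p (-1) 0 + v]) [0]

def max_after_shift_alt (length : Int) (values : List Int) : Int :=
  let n : Int := values.length
  let pfx := pvPrefix values
  let total := (PySem.List.pyRange 0 n 1).foldl
    (fun t i => t + PySem.List.pyGetD values i 0 * (i + 1)) 0
  let best := (PySem.List.pyRange 0 n 1).foldl (fun best i =>
    if i > 0 then
      (PySem.List.pyRange 0 i 1).foldl (fun b l =>
        let d := (PySem.List.pyGetD pfx i 0 - PySem.List.pyGetD pfx l 0)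
                   - PySem.List.pyGetD values i 0 * (i - l)
        if d > b then d else b) best
    else if i < length - 1 then
      (PySem.List.pyRange i length 1).foldl (fun b t =>
        let d := PySem.List.pyGetD values i 0 * (t - i)
                   - (PySem.List.pyGetD pfx (min (t + 1) n) 0 - PySem.List.pyGetD pfx (i + 1) 0)
        if d > b then d else b) best
    else best) 0
  total + best

-- ===== PRECONDITION & SPEC =====
def Spec_max_after_shift (length : Int) (values : List Int) (out : Int) : Prop := out = max_after_shift_alt length values
instance (length : Int) (values : List Int) (out : Int) : Decidable (Spec_max_after_shift length values out) := by unfold Spec_max_after_shift; infer_instance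

-- ===== CLAIM (what is proved, stated in full; the proofs are below) =====
def Claim_equal_max_after_shift : Prop := ∀ (length : Int) (values : List Int), Dom_max_after_shift length values → Spec_max_after_shift length values (max_after_shift length values)

-- ===== LEMMAS AND PROOFS =====

-- the running prefix list after folding xs onto a nonempty accumulator
theorem pvPrefix_foldl (xs acc : List Int) (hacc : acc ≠ []) :
    xs.foldl (fun p v => p ++ [PySem.List.pyGetD p (-1) 0 + v]) acc
      = acc ++ (List.range xs.length).map
          (fun k => acc.getLast hacc + (xs.take (k + 1)).sum) := by
  induction xs generalizing acc with
  | nil => simp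
  | cons x t ih =>
    have hne : acc ++ [PySem.List.pyGetD acc (-1) 0 + x] ≠ [] := by simp
    rw [List.foldl_cons, ih _ hne]
    have hlast : (acc ++ [PySem.List.pyGetD acc (-1) 0 + x]).getLast hne
        = acc.getLast hacc + x := by
      rw [List.getLast_concat, PySem.List.pyGetD_neg_one acc 0 hacc]
    rw [hlast]
    simp [List.range_succ_eq_map, List.append_assoc, Function.comp, add_assoc]
    exact PySem.List.pyGetD_neg_one acc 0 hacc

-- B's prefix list is the list of sums of initial segments
theorem pvPrefix_eq (values : List Int) :
    pvPrefix values = (List.range (values.length + 1)).map (fun k => (values.take k).sum) := by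
  rw [pvPrefix, pvPrefix_foldl values [0] (by simp), List.range_succ_eq_map]
  simp [Function.comp]

theorem pvPrefix_getD (values : List Int) (j : Int) (h0 : 0 ≤ j) (h1 : j ≤ values.length) :
    PySem.List.pyGetD (pvPrefix values) j 0 = (values.take j.toNat).sum := by
  rw [pvPrefix_eq]
  rw [PySem.List.pyGetD_eq_getElem _ _ h0 (by simp; omega)]
  rw [List.getElem_map, List.getElem_range]

-- the sum of a clamped slice is a difference of two initial-segment sums
theorem slice_sum (xs : List Int) (a b : Int) (h0 : 0 ≤ a) (hab : a ≤ b) :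
    (PySem.List.slice xs (some a) (some b)).sum
      = (xs.take (min b.toNat xs.length)).sum - (xs.take (min a.toNat xs.length)).sum := by
  rw [PySem.List.slice_toNat xs h0 (le_trans h0 hab)]
  have ha : a.toNat ≤ b.toNat := Int.toNat_le_toNat hab
  have h2 : b.toNat = a.toNat + (b.toNat - a.toNat) := by omega
  have := List.take_add (l := xs) (i := a.toNat) (j := b.toNat - a.toNat)
  rw [← h2] at this
  have hsum : (xs.take b.toNat).sum = (xs.take a.toNat).sum + ((xs.drop a.toNat).take (b.toNat - a.toNat)).sum := by
    rw [this, List.sum_append]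
  rw [List.take_eq_take_min (i := b.toNat), List.take_eq_take_min (i := a.toNat)] at hsum
  omega

-- a fold over enumerate(xs, s) is a fold over range(s, s+len(xs)) reading xs by index
theorem enum_foldl_eq_range {β : Type} (xs : List Int) (s : Int) (acc : β)
    (f : β → Int → Int → β) :
    (PySem.List.enumerate xs s).foldl (fun r iv => f r iv.1 iv.2) acc
      = (PySem.List.pyRange s (s + xs.length) 1).foldl
          (fun r i => f r i (PySem.List.pyGetD xs (i - s) 0)) acc := by
  induction xs generalizing s acc with
  | nil => simp [PySem.List.enumerate_nil, PySem.List.pyRange_one_eq_nil]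
  | cons x t ih =>
    rw [PySem.List.enumerate_cons, List.foldl_cons,
      PySem.List.pyRange_one_cons (by simp), List.foldl_cons]
    simp only [sub_self, PySem.List.pyGetD_zero_cons]
    rw [ih (s + 1) (f acc s x)]
    have : (s + 1) + (t.length : Int) = s + ((x :: t).length : Int) := by simp; omega
    rw [this]
    apply PySem.List.foldl_congr_mem
    intro r i hi
    rw [PySem.List.mem_pyRange_one] at hi
    congr 1
    have h1 : 1 ≤ i - s := by omega
    have h2 : i - s ≤ (t.length : Int) := by simp at hi; omega
    rw [PySem.List.pyGetD_eq_getElem _ _ (by omega) (by omega),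
        PySem.List.pyGetD_eq_getElem _ _ (by omega) (by omega)]
    have h3 : (i - s).toNat = (i - (s+1)).toNat + 1 := by omega
    rw [← List.getD_eq_getElem _ 0, ← List.getD_eq_getElem _ 0, h3, List.getD_cons_succ]

-- left move: A's slice-sum diff equals B's prefix-sum diff
theorem msd_left (values : List Int) (i l : Int) (h0 : 0 ≤ l) (hl : l < i)
    (hi : i < values.length) :
    pvMultipliedSumDiff values i l
      = (PySem.List.pyGetD (pvPrefix values) i 0 - PySem.List.pyGetD (pvPrefix values) l 0)
          - PySem.List.pyGetD values i 0 * (i - l) := by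
  rw [pvMultipliedSumDiff, if_pos hl,
    slice_sum values l i h0 (le_of_lt hl),
    pvPrefix_getD values i (by omega) (by omega),
    pvPrefix_getD values l (by omega) (by omega)]
  have h1 : min i.toNat values.length = i.toNat := by omega
  have h2 : min l.toNat values.length = l.toNat := by omega
  rw [h1, h2]

-- right move: A's slice-sum diff equals B's prefix-sum diff (slice end clamped by min)
theorem msd_right (values : List Int) (i t : Int) (h0 : 0 ≤ i) (hi : i < values.length)
    (hit : i ≤ t) :
    pvMultipliedSumDiff values i t
      = PySem.List.pyGetD values i 0 * (t - i)
          - (PySem.List.pyGetD (pvPrefix values) (min (t + 1) (values.length : Int)) 0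
              - PySem.List.pyGetD (pvPrefix values) (i + 1) 0) := by
  rw [pvPrefix_getD values (min (t + 1) (values.length : Int)) (by omega) (by omega),
    pvPrefix_getD values (i + 1) (by omega) (by omega)]
  rcases eq_or_lt_of_le hit with h | h
  · subst h
    rw [pvMultipliedSumDiff, if_neg (by omega), if_neg (by omega)]
    have : (min (i + 1) (values.length : Int)).toNat = (i + 1).toNat := by omega
    rw [this]
    ring
  · rw [pvMultipliedSumDiff, if_neg (by omega), if_pos h,
      slice_sum values (i + 1) (t + 1) (by omega) (by omega)]
    have h1 : min (t + 1).toNat values.length = (min (t + 1) (values.length : Int)).toNat := by omega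
    have h2 : min (i + 1).toNat values.length = (i + 1).toNat := by omega
    rw [h1, h2]

-- A's enumerate-based multiplied sum equals B's index-loop total
theorem total_eq (values : List Int) :
    pvMultipliedSum values
      = (PySem.List.pyRange 0 (values.length : Int) 1).foldl
          (fun t i => t + PySem.List.pyGetD values i 0 * (i + 1)) 0 := by
  rw [pvMultipliedSum, enum_foldl_eq_range values 0 0 (fun r i v => r + v * (i + 1))]
  simp only [zero_add, sub_zero]

theorem main_eq (length : Int) (values : List Int) :
    max_after_shift length values = max_after_shift_alt length values := by
  unfold max_after_shift max_after_shift_alt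
  simp only []
  congr 1
  · exact total_eq values
  · rw [enum_foldl_eq_range values 0 0 (fun r i _ =>
      if i > 0 then
        (PySem.List.pyRange 0 i 1).foldl (fun d l =>
          let newdiff := pvMultipliedSumDiff values i l
          if newdiff > d then newdiff else d) r
      else if i < length - 1 then
        (PySem.List.pyRange i length 1).foldl (fun d t =>
          let newdiff := pvMultipliedSumDiff values i t
          if newdiff > d then newdiff else d) r
      else r)]
    simp only [zero_add]
    apply PySem.List.foldl_congr_mem
    intro r i hi
    rw [PySem.List.mem_pyRange_one] at hi
    by_cases hpos : i > 0
    · simp only [if_pos hpos]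
      apply PySem.List.foldl_congr_mem
      intro b l hl
      rw [PySem.List.mem_pyRange_one] at hl
      rw [msd_left values i l hl.1 hl.2 (by omega)]
    · simp only [if_neg hpos]
      by_cases hlt : i < length - 1
      · simp only [if_pos hlt]
        apply PySem.List.foldl_congr_mem
        intro b t ht
        rw [PySem.List.mem_pyRange_one] at ht
        rw [msd_right values i t hi.1 (by omega) ht.1]
      · simp only [if_neg hlt]

-- ===== VERDICT (by name: the statement is the Claim_ definition above) =====
theorem max_after_shift_spec : Claim_equal_max_after_shift := by
  intro length values _
  exact main_eq length values
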